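-- pv_equiv track=rewrite | github.com/bennii/Collection | PythonGraph/analyzeData.py | getIncidenceMap
-- ===== SOURCE A (Python) =====
-- def getIncidenceMap(vertexList, edgeList):
--     incidenceMap = []
--
--     for vertex in vertexList:
--         outgoingEdges = []
--         incomingEdges = []
--         incidenceEntry = (vertex,)
--
--         for key, vert in enumerate(edgeList):
--             # ausgehende Kante.
--             if vert[0] == vertex:
--                 outgoingEdges.append(vert,)
--
--             # eingehende Kante
--             elif vert[1] == vertex:
--                 incomingEdges.append(vert,)
--
--         incidenceEntry += (outgoingEdges, incomingEdges)
--         incidenceMap.append(incidenceEntry)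
--
--     return incidenceMap
-- ===== SOURCE B (Python) =====
-- def getIncidenceMap(vertexList, edgeList):
--     # Index the edges by their endpoints in one pass instead of rescanning
--     # edgeList for every vertex.  A's elif makes a self-loop count only as
--     # outgoing, so an edge is incoming for b only when b != a.
--     outgoing = {v: [] for v in vertexList}
--     incoming = {v: [] for v in vertexList}
--     for edge in edgeList:
--         a, b = edge
--         if a in outgoing:
--             outgoing[a].append(edge)
--         if b != a and b in incoming:
--             incoming[b].append(edge)
--     return [(v, outgoing[v], incoming[v]) for v in vertexList]
-- ===== Notes on version B (the rewrite author's own statement) =====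
-- stated objective: faster
-- what changed: Replaces the per-vertex rescan of edgeList by two dicts keyed by vertex built in one pass over the edges, then a single map over vertexList.
import Mathlib
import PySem

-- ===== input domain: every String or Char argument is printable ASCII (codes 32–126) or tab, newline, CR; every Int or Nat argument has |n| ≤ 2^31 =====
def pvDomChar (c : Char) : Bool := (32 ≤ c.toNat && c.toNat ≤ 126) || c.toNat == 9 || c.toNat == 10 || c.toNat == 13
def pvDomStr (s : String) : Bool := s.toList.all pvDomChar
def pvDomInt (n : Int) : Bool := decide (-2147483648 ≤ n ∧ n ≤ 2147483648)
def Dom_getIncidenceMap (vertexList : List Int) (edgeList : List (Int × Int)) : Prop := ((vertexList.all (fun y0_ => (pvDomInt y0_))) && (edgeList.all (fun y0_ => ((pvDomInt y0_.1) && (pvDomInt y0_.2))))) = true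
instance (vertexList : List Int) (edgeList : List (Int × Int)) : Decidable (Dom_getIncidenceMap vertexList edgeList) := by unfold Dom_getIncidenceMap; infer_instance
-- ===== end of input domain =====

-- B replaces A's per-vertex rescan of edgeList by two vertex-keyed dicts built in one
-- pass over the edges (objective: faster, O(V+E) instead of O(V*E)).

-- ===== PORT A =====
-- Literal port of A: outer loop over vertexList; for each vertex, an inner loop over
-- enumerate(edgeList) accumulating (outgoingEdges, incomingEdges) with if/elif.
def getIncidenceMap (vertexList : List Int) (edgeList : List (Int × Int)) : List (Int × (List (Int × Int)) × (List (Int × Int))) :=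
  vertexList.foldl (fun incidenceMap vertex =>
    let p := (PySem.List.enumerate edgeList).foldl
      (fun (p : List (Int × Int) × List (Int × Int)) kv =>
        if kv.2.1 == vertex then (p.1 ++ [kv.2], p.2)
        else if kv.2.2 == vertex then (p.1, p.2 ++ [kv.2])
        else p) ([], [])
    incidenceMap ++ [(vertex, p.1, p.2)]) []

-- ===== PORT B =====
-- {v: [] for v in vertexList}
def pvInitDict (vertexList : List Int) : PySem.Dict Int (List (Int × Int)) :=
  vertexList.foldl (fun d v => d.insert v []) PySem.Dict.empty

-- 'if a in outgoing: outgoing[a].append(edge)'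
def pvStepOut (d : PySem.Dict Int (List (Int × Int))) (e : Int × Int) : PySem.Dict Int (List (Int × Int)) :=
  if d.contains e.1 then d.modify e.1 [] (· ++ [e]) else d

-- 'if b != a and b in incoming: incoming[b].append(edge)'
def pvStepIn (d : PySem.Dict Int (List (Int × Int))) (e : Int × Int) : PySem.Dict Int (List (Int × Int)) :=
  if e.2 != e.1 && d.contains e.2 then d.modify e.2 [] (· ++ [e]) else d

-- the final comprehension looks up outgoing[v] / incoming[v]; every v in vertexList is a
-- key of both dicts, so getD _ v [] equals Python's (never-failing) d[v] lookup exactly.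
def getIncidenceMap_alt (vertexList : List Int) (edgeList : List (Int × Int)) : List (Int × (List (Int × Int)) × (List (Int × Int))) :=
  let p := edgeList.foldl (fun p e => (pvStepOut p.1 e, pvStepIn p.2 e))
    (pvInitDict vertexList, pvInitDict vertexList)
  vertexList.map (fun v => (v, p.1.getD v [], p.2.getD v []))

-- ===== PRECONDITION & SPEC =====
def Spec_getIncidenceMap (vertexList : List Int) (edgeList : List (Int × Int)) (out : List (Int × (List (Int × Int)) × (List (Int × Int)))) : Prop := out = getIncidenceMap_alt vertexList edgeList
instance (vertexList : List Int) (edgeList : List (Int × Int)) (out : List (Int × (List (Int × Int)) × (List (Int × Int)))) : Decidable (Spec_getIncidenceMap vertexList edgeList out) := by unfold Spec_getIncidenceMap; infer_instance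

-- ===== CLAIM (what is proved, stated in full; the proofs are below) =====
def Claim_equal_getIncidenceMap : Prop := ∀ (vertexList : List Int) (edgeList : List (Int × Int)), Dom_getIncidenceMap vertexList edgeList → Spec_getIncidenceMap vertexList edgeList (getIncidenceMap vertexList edgeList)

-- ===== LEMMAS AND PROOFS =====

-- A's inner loop computes the two filters of edgeList.
theorem pv_innerA (l : List (Int × (Int × Int))) (v : Int) (o i : List (Int × Int)) :
    l.foldl (fun (p : List (Int × Int) × List (Int × Int)) kv =>
        if kv.2.1 == v then (p.1 ++ [kv.2], p.2)
        else if kv.2.2 == v then (p.1, p.2 ++ [kv.2])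
        else p) (o, i)
    = (o ++ (l.map (·.2)).filter (fun e => e.1 == v),
       i ++ (l.map (·.2)).filter (fun e => !(e.1 == v) && e.2 == v)) := by
  induction l generalizing o i with
  | nil => simp
  | cons kv l ih =>
    by_cases h1 : kv.2.1 = v
    · have hb : (kv.2.1 == v) = true := by simp [h1]
      rw [List.foldl_cons]
      simp only [hb, if_true]
      rw [ih]
      simp [h1]
    · have hb : (kv.2.1 == v) = false := by simp [h1]
      by_cases h2 : kv.2.2 = v
      · have hb2 : (kv.2.2 == v) = true := by simp [h2]
        rw [List.foldl_cons]
        simp only [hb, hb2, if_false, Bool.false_eq_true]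
        rw [ih]
        simp [h1, h2]
      · have hb2 : (kv.2.2 == v) = false := by simp [h2]
        rw [List.foldl_cons]
        simp only [hb, hb2, if_false, Bool.false_eq_true]
        rw [ih]
        simp [h1, h2]

-- a fold of a pair of independent steps is the pair of folds
theorem pv_pairFold (l : List (Int × Int))
    (o i : PySem.Dict Int (List (Int × Int))) :
    l.foldl (fun p e => (pvStepOut p.1 e, pvStepIn p.2 e)) (o, i)
    = (l.foldl pvStepOut o, l.foldl pvStepIn i) := by
  induction l generalizing o i with
  | nil => rfl
  | cons e l ih => simp [List.foldl_cons, ih]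

theorem pv_contains_initAux (vl : List Int) (d : PySem.Dict Int (List (Int × Int))) (x : Int) :
    (vl.foldl (fun d v => d.insert v []) d).contains x = (d.contains x || decide (x ∈ vl)) := by
  induction vl generalizing d with
  | nil => simp
  | cons v vl ih =>
    simp only [List.foldl_cons, ih, PySem.Dict.contains_insert]
    by_cases h : x = v
    · simp [h]
    · rw [show (x == v) = false from by simp [h]]
      simp [h]

theorem pv_contains_init (vl : List Int) (x : Int) (hx : x ∈ vl) :
    (pvInitDict vl).contains x = true := by
  unfold pvInitDict
  simp [pv_contains_initAux, hx]

theorem pv_getD_initAux (vl : List Int) (d : PySem.Dict Int (List (Int × Int))) (x : Int)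
    (h : d.getD x [] = []) : (vl.foldl (fun d v => d.insert v []) d).getD x [] = [] := by
  induction vl generalizing d with
  | nil => exact h
  | cons v vl ih =>
    simp only [List.foldl_cons]
    apply ih
    rw [PySem.Dict.getD_insert]
    split <;> simp [h]

theorem pv_getD_init (vl : List Int) (x : Int) : (pvInitDict vl).getD x [] = [] := by
  unfold pvInitDict
  exact pv_getD_initAux vl _ x (by simp)

theorem pv_outFold (l : List (Int × Int)) (d : PySem.Dict Int (List (Int × Int))) (v : Int)
    (hv : d.contains v = true) :
    (l.foldl pvStepOut d).getD v [] = d.getD v [] ++ l.filter (fun e => e.1 == v) := by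
  induction l generalizing d with
  | nil => simp
  | cons e l ih =>
    simp only [List.foldl_cons]
    by_cases h1 : e.1 = v
    · have hc : d.contains e.1 = true := by rw [h1]; exact hv
      rw [show pvStepOut d e = d.modify e.1 [] (· ++ [e]) by simp [pvStepOut, hc]]
      rw [ih _ (by simp [PySem.Dict.contains_modify, hv])]
      rw [h1, PySem.Dict.getD_modify_self]
      simp [h1]
    · have hstep : (pvStepOut d e).getD v [] = d.getD v [] := by
        unfold pvStepOut
        split
        · exact PySem.Dict.getD_modify_of_ne d [] _ (fun hh => h1 hh.symm)
        · rfl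
      have hcont : (pvStepOut d e).contains v = true := by
        unfold pvStepOut
        split
        · simp [PySem.Dict.contains_modify, hv]
        · exact hv
      rw [ih _ hcont, hstep]
      simp [h1]

theorem pv_inFold (l : List (Int × Int)) (d : PySem.Dict Int (List (Int × Int))) (v : Int)
    (hv : d.contains v = true) :
    (l.foldl pvStepIn d).getD v []
      = d.getD v [] ++ l.filter (fun e => !(e.1 == v) && e.2 == v) := by
  induction l generalizing d with
  | nil => simp
  | cons e l ih =>
    simp only [List.foldl_cons]
    have hcont : ∀ d' : PySem.Dict Int (List (Int × Int)), d'.contains v = true →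
        (pvStepIn d' e).contains v = true := by
      intro d' h
      unfold pvStepIn
      split
      · simp [PySem.Dict.contains_modify, h]
      · exact h
    by_cases h2 : e.2 = v
    · by_cases h1 : e.1 = v
      · -- self-loop at v: guard e.2 != e.1 is false, nothing appended; filter skips too
        have : pvStepIn d e = d := by
          unfold pvStepIn
          simp [h1, h2]
        rw [this, ih _ hv]
        simp [h1, h2]
      · have hc : d.contains e.2 = true := by rw [h2]; exact hv
        have hne : e.2 ≠ e.1 := by
          rw [h2]
          exact fun hh => h1 hh.symm
        have hg : (e.2 != e.1 && d.contains e.2) = true := by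
          simp [hc, hne]
        have : pvStepIn d e = d.modify e.2 [] (· ++ [e]) := by
          unfold pvStepIn
          simp [hg]
        rw [this, ih _ (by simp [PySem.Dict.contains_modify, hv])]
        rw [h2, PySem.Dict.getD_modify_self]
        simp [h1, h2]
    · have hstep : (pvStepIn d e).getD v [] = d.getD v [] := by
        unfold pvStepIn
        split
        · exact PySem.Dict.getD_modify_of_ne d [] _ (fun hh => h2 hh.symm)
        · rfl
      rw [ih _ (hcont d hv), hstep]
      simp [h2]

-- A's outer loop, with the inner loop replaced by the filters via pv_innerA
theorem pv_A_eq_map (vl : List Int) (el : List (Int × Int))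
    (acc : List (Int × (List (Int × Int)) × (List (Int × Int)))) :
    vl.foldl (fun incidenceMap vertex =>
      let p := (PySem.List.enumerate el).foldl
        (fun (p : List (Int × Int) × List (Int × Int)) kv =>
          if kv.2.1 == vertex then (p.1 ++ [kv.2], p.2)
          else if kv.2.2 == vertex then (p.1, p.2 ++ [kv.2])
          else p) ([], [])
      incidenceMap ++ [(vertex, p.1, p.2)]) acc
    = acc ++ vl.map (fun v =>
        (v, el.filter (fun e => e.1 == v), el.filter (fun e => !(e.1 == v) && e.2 == v))) := by
  induction vl generalizing acc with
  | nil => simp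
  | cons v vl ih =>
    simp only [List.foldl_cons, List.map_cons]
    rw [ih]
    have h := pv_innerA (PySem.List.enumerate el) v [] []
    rw [PySem.List.map_snd_enumerate] at h
    simp only [h]
    simp

-- ===== VERDICT (by name: the statement is the Claim_ definition above) =====
theorem getIncidenceMap_spec : Claim_equal_getIncidenceMap := by
  intro vl el _
  unfold Spec_getIncidenceMap getIncidenceMap getIncidenceMap_alt
  rw [pv_A_eq_map, pv_pairFold]
  simp only [List.nil_append]
  apply List.map_congr_left
  intro v hv
  have hc := pv_contains_init vl v hv
  rw [pv_outFold el _ v hc, pv_inFold el _ v hc, pv_getD_init]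
  simp
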